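-- pv_equiv track=rewrite | github.com/smatt989/locations | date_extract.py | dates_in_date_range
-- ===== SOURCE A (Python) =====
-- days = ['sun', 'mon', 'tue', 'wed', 'thu', 'fri', 'sat']
--
-- def index_of(day):
-- 	return days.index(day)
--
-- def dates_in_date_range(date_range):
-- 	dates = []
-- 	if(len(date_range) == 1):
-- 		date = index_of(date_range[0])
-- 		dates.append(days[date])
-- 	else:
-- 		start = index_of(date_range[0])
-- 		end = index_of(date_range[1])
-- 		if start > end:
-- 			i = 0
-- 			while i <= end:
-- 				dates.append(days[i])
-- 				i = i + 1
-- 			j = start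
-- 			while j <= len(days) - 1:
-- 				dates.append(days[j])
-- 				j = j + 1
-- 		else:
-- 			i = start
-- 			while i <= end:
-- 				dates.append(days[i])
-- 				i = i + 1
-- 	return dates
-- ===== SOURCE B (Python) =====
-- days = ['sun', 'mon', 'tue', 'wed', 'thu', 'fri', 'sat']
--
-- def index_of(day):
--     return days.index(day)
--
-- def dates_in_date_range(date_range):
--     start = index_of(date_range[0])
--     end = start if len(date_range) == 1 else index_of(date_range[1])
--     count = (end - start) % 7 + 1
--     return [days[i] for i in sorted((start + k) % 7 for k in range(count))]
-- ===== Notes on version B (the rewrite author's own statement) =====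
-- stated objective: alternative
-- what changed: Drops the wrap/non-wrap branch entirely: B computes the number of selected days by modular arithmetic ((end-start)%7+1), generates the selected indices by rotation (start+k)%7, and sorts them, which reproduces A's output order in both the plain and the wrapping case.
import Mathlib
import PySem

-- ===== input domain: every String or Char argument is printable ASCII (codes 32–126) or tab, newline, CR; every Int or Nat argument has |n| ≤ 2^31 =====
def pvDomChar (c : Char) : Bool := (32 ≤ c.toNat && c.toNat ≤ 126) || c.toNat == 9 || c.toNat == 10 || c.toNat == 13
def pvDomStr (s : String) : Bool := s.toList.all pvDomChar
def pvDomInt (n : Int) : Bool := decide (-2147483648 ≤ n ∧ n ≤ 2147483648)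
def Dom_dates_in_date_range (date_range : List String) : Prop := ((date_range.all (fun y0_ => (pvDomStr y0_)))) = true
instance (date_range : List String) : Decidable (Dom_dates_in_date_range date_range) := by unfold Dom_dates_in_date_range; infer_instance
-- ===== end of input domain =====

-- B replaces A's wrap/non-wrap branching and index loops by modular rotation plus a sort; same cost, branch-free.

def pvDays : List String := ["sun", "mon", "tue", "wed", "thu", "fri", "sat"]

-- days.index(day); raises ValueError when absent (none here, excluded by Pre_)
def pvIndexOf (day : String) : Option Nat := PySem.List.index? pvDays day

-- while i <= stop: dates.append(days[i]); i += 1   (as a fold over the visited indices)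
def pvWhileAppend (i stop : Int) (dates : List String) : List String :=
  (PySem.List.pyRange i (stop + 1) 1).foldl
    (fun ds k => ds ++ [PySem.List.pyGetD pvDays k ""]) dates

-- ===== PORT A =====
def dates_in_date_range (date_range : List String) : List String :=
  if date_range.length = 1 then
    match PySem.List.pyGet? date_range 0 with
    | none => []
    | some d =>
      match pvIndexOf d with
      | none => []
      | some date => [] ++ [PySem.List.pyGetD pvDays (date : Int) ""]
  else
    match PySem.List.pyGet? date_range 0 with
    | none => []
    | some d0 =>
      match PySem.List.pyGet? date_range 1 with
      | none => []
      | some d1 =>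
        match pvIndexOf d0, pvIndexOf d1 with
        | some start, some stop =>
          if (start : Int) > (stop : Int) then
            pvWhileAppend (start : Int) ((pvDays.length : Int) - 1)
              (pvWhileAppend 0 (stop : Int) [])
          else
            pvWhileAppend (start : Int) (stop : Int) []
        | _, _ => []

-- ===== PORT B =====
def dates_in_date_range_alt (date_range : List String) : List String :=
  match PySem.List.pyGet? date_range 0 with
  | none => []
  | some d0 =>
    match pvIndexOf d0 with
    | none => []
    | some start =>
      match (if date_range.length = 1 then some start
             else match PySem.List.pyGet? date_range 1 with
                  | none => none
                  | some d1 => pvIndexOf d1) with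
      | none => []
      | some stop =>
        let count := PySem.Int.mod ((stop : Int) - (start : Int)) 7 + 1
        let picked := PySem.List.sorted
          ((PySem.List.pyRange 0 count 1).map
            (fun k => PySem.Int.mod ((start : Int) + k) 7))
          (fun x => x) false
        picked.map (fun i => PySem.List.pyGetD pvDays i "")

-- ===== PRECONDITION & SPEC =====
-- Pre_ excludes exactly the inputs on which A raises: the empty list (IndexError) and
-- lists whose first (or, when len ≠ 1, second) element is not a weekday name (ValueError).
def Pre_dates_in_date_range (date_range : List String) : Prop :=
  date_range ≠ [] ∧ date_range.headI ∈ pvDays ∧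
    (date_range.length = 1 ∨ date_range.getD 1 "" ∈ pvDays)
instance (date_range : List String) : Decidable (Pre_dates_in_date_range date_range) := by
  unfold Pre_dates_in_date_range; infer_instance

def pvWitness_dates_in_date_range : List String := ["fri", "tue"]

def Spec_dates_in_date_range (date_range : List String) (out : List String) : Prop :=
  out = dates_in_date_range_alt date_range
instance (date_range : List String) (out : List String) :
    Decidable (Spec_dates_in_date_range date_range out) := by
  unfold Spec_dates_in_date_range; infer_instance

-- ===== CLAIM (what is proved, stated in full; the proofs are below) =====
def Claim_equal_dates_in_date_range : Prop :=
  ∀ (date_range : List String), Dom_dates_in_date_range date_range →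
    Pre_dates_in_date_range date_range →
    Spec_dates_in_date_range date_range (dates_in_date_range date_range)

-- ===== LEMMAS AND PROOFS =====
theorem pvGet_one_cons (x y : String) (xs : List String) :
    PySem.List.pyGet? (x :: y :: xs) 1 = some y := by
  have h := PySem.List.pyGet?_cons_succ (x := x) (xs := y :: xs) (n := 0)
  rw [show ((0:Nat):Int) + 1 = 1 from rfl] at h
  rw [h, show ((0:Nat):Int) = 0 from rfl, PySem.List.pyGet?_zero_cons]

-- ===== VERDICT (by name: the statement is the Claim_ definition above) =====
theorem dates_in_date_range_spec : Claim_equal_dates_in_date_range := by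
  intro dr _ hpre
  obtain ⟨hne, hh, hsec⟩ := hpre
  unfold Spec_dates_in_date_range
  match dr with
  | [] => exact absurd rfl hne
  | [d0] =>
    simp only [List.headI] at hh
    fin_cases hh <;> decide
  | d0 :: d1 :: rest =>
    simp only [List.headI] at hh
    have hd1 : d1 ∈ pvDays := by
      rcases hsec with h | h
      · simp at h
      · simpa using h
    have h0 : PySem.List.pyGet? (d0 :: d1 :: rest) 0 = some d0 :=
      PySem.List.pyGet?_zero_cons ..
    have h1 : PySem.List.pyGet? (d0 :: d1 :: rest) 1 = some d1 := pvGet_one_cons ..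
    have hlen : ¬ ((d0 :: d1 :: rest).length = 1) := by simp
    simp only [dates_in_date_range, dates_in_date_range_alt, h0, h1, if_neg hlen]
    fin_cases hh <;> fin_cases hd1 <;> decide
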